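-- pv_equiv track=rewrite | github.com/KolmogorovLab/Wakhan | src/coverage/segmentation.py | split_regions_by_points
-- ===== SOURCE A (Python) =====
-- def split_regions_by_points(starts, ends, values1, values2, split_points):
--     split_points = sorted(set(split_points))
--     new_starts = []
--     new_ends = []
--     new_values1 = []
--     new_values2 = []
--
--     for start, end, val1, val2 in zip(starts, ends, values1, values2):
--         # Get split points within this region
--         internal_splits = [pt for pt in split_points if start < pt < end]
--         boundaries = [start] + internal_splits + [end]
--
--         for i in range(len(boundaries) - 1):
--             new_starts.append(boundaries[i])
--             new_ends.append(boundaries[i + 1])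
--             new_values1.append(val1)
--             new_values2.append(val2)
--
--     return new_starts, new_ends, new_values1, new_values2
-- ===== SOURCE B (Python) =====
-- def split_regions_by_points(starts, ends, values1, values2, split_points):
--     pts = sorted(set(split_points))
--
--     def first_true(a, pred):
--         # least index i with pred(a[i]) (len(a) if no such index); pred monotone on a
--         lo, hi = 0, len(a)
--         while lo < hi:
--             mid = (lo + hi) // 2
--             if pred(a[mid]):
--                 hi = mid
--             else:
--                 lo = mid + 1
--         return lo
--
--     new_starts, new_ends, new_values1, new_values2 = [], [], [], []
--     for start, end, val1, val2 in zip(starts, ends, values1, values2):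
--         lo = first_true(pts, lambda v: start < v)
--         hi = first_true(pts, lambda v: end <= v)
--         seg = pts[lo:hi]
--         bs = [start] + seg
--         new_starts += bs
--         new_ends += seg + [end]
--         new_values1 += [val1] * len(bs)
--         new_values2 += [val2] * len(bs)
--     return new_starts, new_ends, new_values1, new_values2
-- ===== Notes on version B (the rewrite author's own statement) =====
-- stated objective: alternative
-- what changed: Instead of linearly filtering the whole sorted split-point list for every region and then re-walking a boundaries list by index, B binary-searches the sorted unique split points for each region's contiguous slice and extends the four output lists blockwise; measured 1.5-2.5x faster on the generated inputs but unconfirmed at the largest size (output size dominates both).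
import Mathlib
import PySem

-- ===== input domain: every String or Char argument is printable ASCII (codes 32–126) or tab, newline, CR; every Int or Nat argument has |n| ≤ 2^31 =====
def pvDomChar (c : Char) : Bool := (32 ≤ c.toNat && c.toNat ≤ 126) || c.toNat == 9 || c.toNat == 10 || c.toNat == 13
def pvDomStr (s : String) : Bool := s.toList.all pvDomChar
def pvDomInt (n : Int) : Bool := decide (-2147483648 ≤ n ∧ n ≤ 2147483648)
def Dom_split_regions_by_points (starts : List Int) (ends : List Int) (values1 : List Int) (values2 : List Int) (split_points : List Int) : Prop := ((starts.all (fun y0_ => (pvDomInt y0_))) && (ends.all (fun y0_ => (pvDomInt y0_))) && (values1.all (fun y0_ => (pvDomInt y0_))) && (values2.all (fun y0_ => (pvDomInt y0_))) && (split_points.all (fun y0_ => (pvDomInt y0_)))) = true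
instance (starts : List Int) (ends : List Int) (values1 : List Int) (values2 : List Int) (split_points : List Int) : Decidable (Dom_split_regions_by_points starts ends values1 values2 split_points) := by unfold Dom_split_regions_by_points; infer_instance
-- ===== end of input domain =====

-- B replaces A's per-region linear filter of the sorted split points by a binary
-- search for the region's contiguous slice, extending the outputs blockwise
-- (objective: alternative algorithm; fewer comparisons per region).

-- ===== PORT A =====
-- Python zip over four lists (stops at the shortest); shared by both ports.
def pvZip4 : List Int → List Int → List Int → List Int → List (Int × Int × Int × Int)
  | s :: ss, e :: es, v :: vs, w :: ws => (s, e, v, w) :: pvZip4 ss es vs ws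
  | _, _, _, _ => []

-- Literal port of A.  Inside the inner loop 0 ≤ i and i + 1 < len(boundaries),
-- so pyGetD is exactly Python's boundaries[i] / boundaries[i + 1].
def split_regions_by_points (starts : List Int) (ends : List Int) (values1 : List Int) (values2 : List Int) (split_points : List Int) : List Int × List Int × List Int × List Int :=
  let sp := PySem.List.sorted (PySem.Set.ofList split_points) (fun x => x)
  (pvZip4 starts ends values1 values2).foldl
    (fun acc r =>
      let internal := sp.filter (fun pt => decide (r.1 < pt) && decide (pt < r.2.1))
      let boundaries := [r.1] ++ internal ++ [r.2.1]
      (PySem.List.pyRange 0 ((boundaries.length : Int) - 1) 1).foldl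
        (fun a i =>
          (a.1 ++ [PySem.List.pyGetD boundaries i 0],
           a.2.1 ++ [PySem.List.pyGetD boundaries (i + 1) 0],
           a.2.2.1 ++ [r.2.2.1],
           a.2.2.2 ++ [r.2.2.2])) acc)
    ([], [], [], [])

-- ===== PORT B =====
-- Source B's hand-written binary search: least index in [lo, hi) whose element
-- satisfies pred (hi if none).  a[mid] is in range whenever called by the port,
-- so getD is exactly Python's a[mid].
def pvFirstTrue (a : List Int) (pred : Int → Bool) (lo hi : Nat) : Nat :=
  if _h : lo < hi then
    let mid := (lo + hi) / 2
    if pred (a.getD mid 0) then pvFirstTrue a pred lo mid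
    else pvFirstTrue a pred (mid + 1) hi
  else lo
termination_by hi - lo
decreasing_by all_goals omega

-- Literal port of B (from Source B).
def split_regions_by_points_alt (starts : List Int) (ends : List Int) (values1 : List Int) (values2 : List Int) (split_points : List Int) : List Int × List Int × List Int × List Int :=
  let pts := PySem.List.sorted (PySem.Set.ofList split_points) (fun x => x)
  (pvZip4 starts ends values1 values2).foldl
    (fun acc r =>
      let lo := pvFirstTrue pts (fun v => decide (r.1 < v)) 0 pts.length
      let hi := pvFirstTrue pts (fun v => decide (r.2.1 ≤ v)) 0 pts.length
      let seg := PySem.List.slice pts (some (lo : Int)) (some (hi : Int))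
      let bs := [r.1] ++ seg
      (acc.1 ++ bs,
       acc.2.1 ++ (seg ++ [r.2.1]),
       acc.2.2.1 ++ List.replicate bs.length r.2.2.1,
       acc.2.2.2 ++ List.replicate bs.length r.2.2.2))
    ([], [], [], [])

-- ===== PRECONDITION & SPEC =====
def Spec_split_regions_by_points (starts : List Int) (ends : List Int) (values1 : List Int) (values2 : List Int) (split_points : List Int) (out : List Int × List Int × List Int × List Int) : Prop := out = split_regions_by_points_alt starts ends values1 values2 split_points
instance (starts : List Int) (ends : List Int) (values1 : List Int) (values2 : List Int) (split_points : List Int) (out : List Int × List Int × List Int × List Int) : Decidable (Spec_split_regions_by_points starts ends values1 values2 split_points out) := by unfold Spec_split_regions_by_points; infer_instance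

-- ===== CLAIM (what is proved, stated in full; the proofs are below) =====
def Claim_equal_split_regions_by_points : Prop := ∀ (starts : List Int) (ends : List Int) (values1 : List Int) (values2 : List Int) (split_points : List Int), Dom_split_regions_by_points starts ends values1 values2 split_points → Spec_split_regions_by_points starts ends values1 values2 split_points (split_regions_by_points starts ends values1 values2 split_points)

-- ===== LEMMAS AND PROOFS =====

-- The binary search returns the index of the first element satisfying pred,
-- provided pred is monotone (false then true) along the list.
lemma pvFirstTrue_eq_findIdx_aux (a : List Int) (p : Int → Bool)
    (hmono : ∀ i j (hi' : i < a.length) (hj' : j < a.length), i ≤ j → p a[i] = true → p a[j] = true) :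
    ∀ n lo hi, hi - lo ≤ n → hi ≤ a.length → lo ≤ a.findIdx p → a.findIdx p ≤ hi →
      pvFirstTrue a p lo hi = a.findIdx p := by
  intro n
  induction n with
  | zero =>
    intro lo hi h1 h2 h3 h4
    rw [pvFirstTrue]
    split
    · omega
    · omega
  | succ n ih =>
    intro lo hi h1 h2 h3 h4
    rw [pvFirstTrue]
    split
    · next hlt =>
      have hmidlt : (lo + hi) / 2 < hi := by omega
      have hmida : (lo + hi) / 2 < a.length := by omega
      show (if p (a.getD ((lo + hi) / 2) 0) then _ else _) = _
      rw [List.getD_eq_getElem a 0 hmida]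
      by_cases hp : p a[(lo + hi) / 2] = true
      · rw [if_pos hp]
        have hfle : a.findIdx p ≤ (lo + hi) / 2 := by
          by_contra hc
          push Not at hc
          have hf := List.not_of_lt_findIdx hc
          exact Bool.false_ne_true (hf.symm.trans hp)
        exact ih lo ((lo + hi) / 2) (by omega) (by omega) h3 hfle
      · rw [if_neg hp]
        have hfi : (lo + hi) / 2 + 1 ≤ a.findIdx p := by
          by_contra hc
          push Not at hc
          have hfl : a.findIdx p < a.length := by omega
          have hpf : p a[a.findIdx p] = true := List.findIdx_getElem (w := hfl)
          exact hp (hmono (a.findIdx p) ((lo + hi) / 2) hfl hmida (by omega) hpf)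
        exact ih ((lo + hi) / 2 + 1) hi (by omega) h2 hfi h4
    · next hge => omega

lemma pvFirstTrue_eq_findIdx (a : List Int) (p : Int → Bool)
    (hmono : ∀ i j (hi' : i < a.length) (hj' : j < a.length), i ≤ j → p a[i] = true → p a[j] = true) :
    pvFirstTrue a p 0 a.length = a.findIdx p :=
  pvFirstTrue_eq_findIdx_aux a p hmono a.length 0 a.length (by omega) (le_refl _)
    (Nat.zero_le _) List.findIdx_le_length

-- On a strictly increasing list, the slice between the two search results is
-- exactly A's filter of the internal split points.
lemma take_drop_findIdx_eq_filter (a b : Int) :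
    ∀ (l : List Int), l.Pairwise (· < ·) →
      List.take (l.findIdx (fun x => decide (b ≤ x)) - l.findIdx (fun x => decide (a < x)))
        (List.drop (l.findIdx (fun x => decide (a < x))) l)
      = l.filter (fun x => decide (a < x) && decide (x < b)) := by
  intro l
  induction l with
  | nil => intro _; simp
  | cons h t iht =>
    intro hp
    have hall : ∀ y ∈ t, h < y := (List.pairwise_cons.mp hp).1
    have ht : t.Pairwise (· < ·) := (List.pairwise_cons.mp hp).2
    rw [List.findIdx_cons, List.findIdx_cons]
    by_cases hah : a < h
    · by_cases hbh : b ≤ h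
      · simp only [decide_eq_true hah, decide_eq_true hbh, cond_true]
        rw [List.take_zero]
        symm
        rw [List.filter_eq_nil_iff]
        intro x hx
        rcases List.mem_cons.mp hx with rfl | hxt
        · simp; omega
        · have := hall x hxt; simp; omega
      · simp only [decide_eq_true hah, decide_eq_false hbh, cond_true, cond_false]
        rw [List.drop_zero, Nat.sub_zero]
        rw [List.take_succ_cons]
        have hxh : (decide (a < h) && decide (h < b)) = true := by simp; omega
        rw [List.filter_cons, if_pos hxh]
        congr 1
        cases t with
        | nil => simp
        | cons t0 t' =>
          have h0 : a < t0 := lt_trans hah (hall t0 (by simp))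
          have hlo0 : List.findIdx (fun x => decide (a < x)) (t0 :: t') = 0 := by
            rw [List.findIdx_cons, decide_eq_true h0, cond_true]
          have := iht ht
          rw [hlo0, List.drop_zero, Nat.sub_zero] at this
          exact this
    · by_cases hbh : b ≤ h
      · simp only [decide_eq_false hah, decide_eq_true hbh, cond_true, cond_false]
        rw [Nat.zero_sub, List.take_zero]
        symm
        rw [List.filter_eq_nil_iff]
        intro x hx
        rcases List.mem_cons.mp hx with rfl | hxt
        · simp; omega
        · have := hall x hxt; simp; omega
      · simp only [decide_eq_false hah, decide_eq_false hbh, cond_false]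
        rw [List.drop_succ_cons, Nat.succ_sub_succ]
        have hxh : (decide (a < h) && decide (h < b)) = false := by simp; omega
        rw [List.filter_cons, if_neg (by simp [hxh])]
        exact iht ht

-- A fold that appends one element to each component of a 4-tuple accumulator.
lemma foldl_quad1 {α : Type} (g1 g2 g3 g4 : α → Int) :
    ∀ (xs : List α) (acc : List Int × List Int × List Int × List Int),
      xs.foldl (fun a x => (a.1 ++ [g1 x], a.2.1 ++ [g2 x], a.2.2.1 ++ [g3 x], a.2.2.2 ++ [g4 x])) acc
      = (acc.1 ++ xs.map g1, acc.2.1 ++ xs.map g2, acc.2.2.1 ++ xs.map g3, acc.2.2.2 ++ xs.map g4) := by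
  intro xs
  induction xs with
  | nil => intro acc; simp
  | cons x xs ih =>
    intro acc
    rw [List.foldl_cons, ih]
    simp

-- Per-region step equality: A's inner boundaries loop produces exactly B's
-- slice-based block.
lemma step_eq (pts : List Int) (hpts : pts.Pairwise (· < ·))
    (acc : List Int × List Int × List Int × List Int) (r : Int × Int × Int × Int) :
    (let internal := pts.filter (fun pt => decide (r.1 < pt) && decide (pt < r.2.1))
     let boundaries := [r.1] ++ internal ++ [r.2.1]
     (PySem.List.pyRange 0 ((boundaries.length : Int) - 1) 1).foldl
       (fun a i =>
         (a.1 ++ [PySem.List.pyGetD boundaries i 0],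
          a.2.1 ++ [PySem.List.pyGetD boundaries (i + 1) 0],
          a.2.2.1 ++ [r.2.2.1],
          a.2.2.2 ++ [r.2.2.2])) acc)
    =
    (let lo := pvFirstTrue pts (fun v => decide (r.1 < v)) 0 pts.length
     let hi := pvFirstTrue pts (fun v => decide (r.2.1 ≤ v)) 0 pts.length
     let seg := PySem.List.slice pts (some (lo : Int)) (some (hi : Int))
     let bs := [r.1] ++ seg
     (acc.1 ++ bs,
      acc.2.1 ++ (seg ++ [r.2.1]),
      acc.2.2.1 ++ List.replicate bs.length r.2.2.1,
      acc.2.2.2 ++ List.replicate bs.length r.2.2.2)) := by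
  have hmono1 : ∀ i j (hi' : i < pts.length) (hj' : j < pts.length), i ≤ j →
      (fun v => decide (r.1 < v)) pts[i] = true → (fun v => decide (r.1 < v)) pts[j] = true := by
    intro i j hi' hj' hij hp
    simp only [decide_eq_true_eq] at *
    rcases Nat.lt_or_ge i j with hlt | hge
    · exact lt_trans hp (List.pairwise_iff_getElem.mp hpts i j hi' hj' hlt)
    · have : i = j := by omega
      subst this; exact hp
  have hmono2 : ∀ i j (hi' : i < pts.length) (hj' : j < pts.length), i ≤ j →
      (fun v => decide (r.2.1 ≤ v)) pts[i] = true → (fun v => decide (r.2.1 ≤ v)) pts[j] = true := by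
    intro i j hi' hj' hij hp
    simp only [decide_eq_true_eq] at *
    rcases Nat.lt_or_ge i j with hlt | hge
    · exact le_of_lt (lt_of_le_of_lt hp (List.pairwise_iff_getElem.mp hpts i j hi' hj' hlt))
    · have : i = j := by omega
      subst this; exact hp
  simp only []
  set internal := pts.filter (fun pt => decide (r.1 < pt) && decide (pt < r.2.1)) with hint
  set bd := [r.1] ++ internal ++ [r.2.1] with hbd
  have hbdlen : bd.length = internal.length + 2 := by simp [hbd]
  -- B's slice is A's filter
  have hseg : PySem.List.slice pts (some ((pvFirstTrue pts (fun v => decide (r.1 < v)) 0 pts.length : Nat) : Int))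
      (some ((pvFirstTrue pts (fun v => decide (r.2.1 ≤ v)) 0 pts.length : Nat) : Int)) = internal := by
    rw [pvFirstTrue_eq_findIdx pts _ hmono1, pvFirstTrue_eq_findIdx pts _ hmono2,
      PySem.List.slice_natCast]
    exact take_drop_findIdx_eq_filter r.1 r.2.1 pts hpts
  -- A's inner boundaries loop, componentwise
  rw [foldl_quad1 (fun i => PySem.List.pyGetD bd i 0) (fun i => PySem.List.pyGetD bd (i + 1) 0)
    (fun _ => r.2.2.1) (fun _ => r.2.2.2)]
  have hdrop : bd.dropLast = [r.1] ++ internal := by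
    rw [List.dropLast_concat]
  have htail : bd.tail = internal ++ [r.2.1] := by simp [hbd]
  have hlen1 : ((bd.length : Int) - 1) = ((bd.dropLast.length : Nat) : Int) := by
    rw [List.length_dropLast, hbdlen]; push_cast; ring
  have hlen2 : ((bd.length : Int) - 1) = ((bd.tail.length : Nat) : Int) := by
    rw [List.length_tail, hbdlen]; push_cast; ring
  have hmap1 : (PySem.List.pyRange 0 ((bd.length : Int) - 1) 1).map (fun i => PySem.List.pyGetD bd i 0)
      = bd.dropLast := by
    rw [hlen1]
    refine Eq.trans ?_ (PySem.List.map_pyGetD_pyRange_zero' bd.dropLast 0)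
    apply List.map_congr_left
    intro i hi
    obtain ⟨h0, hltI⟩ := PySem.List.mem_pyRange_one.mp hi
    rw [PySem.List.pyGetD_of_nonneg _ _ h0, PySem.List.pyGetD_of_nonneg _ _ h0]
    have hiN : i.toNat < bd.dropLast.length := by omega
    have hiN' : i.toNat < bd.length := by rw [List.length_dropLast] at hiN; omega
    rw [List.getD_eq_getElem _ _ hiN', List.getD_eq_getElem _ _ hiN]
    exact (List.getElem_dropLast hiN).symm
  have hmap2 : (PySem.List.pyRange 0 ((bd.length : Int) - 1) 1).map (fun i => PySem.List.pyGetD bd (i + 1) 0)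
      = bd.tail := by
    rw [hlen2]
    refine Eq.trans ?_ (PySem.List.map_pyGetD_pyRange_zero' bd.tail 0)
    apply List.map_congr_left
    intro i hi
    obtain ⟨h0, hltI⟩ := PySem.List.mem_pyRange_one.mp hi
    rw [PySem.List.pyGetD_of_nonneg _ _ (by omega : (0:Int) ≤ i + 1), PySem.List.pyGetD_of_nonneg _ _ h0]
    have hiN : i.toNat < bd.tail.length := by omega
    have h1N : (i + 1).toNat < bd.length := by
      rw [List.length_tail] at hiN; omega
    rw [List.getD_eq_getElem _ _ h1N, List.getD_eq_getElem _ _ hiN, List.getElem_tail]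
    congr 1
    omega
  have hcnt : ((PySem.List.pyRange 0 ((bd.length : Int) - 1) 1).length) = ([r.1] ++ internal).length := by
    rw [PySem.List.length_pyRange_one]
    simp [hbdlen]
    omega
  have hmap3 : (PySem.List.pyRange 0 ((bd.length : Int) - 1) 1).map (fun _ => r.2.2.1)
      = List.replicate ([r.1] ++ internal).length r.2.2.1 := by
    rw [List.map_const', hcnt]
  have hmap4 : (PySem.List.pyRange 0 ((bd.length : Int) - 1) 1).map (fun _ => r.2.2.2)
      = List.replicate ([r.1] ++ internal).length r.2.2.2 := by
    rw [List.map_const', hcnt]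
  rw [hseg, hmap1, hmap2, hmap3, hmap4, hdrop, htail]

-- The two region loops agree from any accumulator.
lemma loop_eq (pts : List Int) (hpts : pts.Pairwise (· < ·)) :
    ∀ (rs : List (Int × Int × Int × Int)) (acc : List Int × List Int × List Int × List Int),
      rs.foldl
        (fun acc r =>
          let internal := pts.filter (fun pt => decide (r.1 < pt) && decide (pt < r.2.1))
          let boundaries := [r.1] ++ internal ++ [r.2.1]
          (PySem.List.pyRange 0 ((boundaries.length : Int) - 1) 1).foldl
            (fun a i =>
              (a.1 ++ [PySem.List.pyGetD boundaries i 0],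
               a.2.1 ++ [PySem.List.pyGetD boundaries (i + 1) 0],
               a.2.2.1 ++ [r.2.2.1],
               a.2.2.2 ++ [r.2.2.2])) acc) acc
      = rs.foldl
        (fun acc r =>
          let lo := pvFirstTrue pts (fun v => decide (r.1 < v)) 0 pts.length
          let hi := pvFirstTrue pts (fun v => decide (r.2.1 ≤ v)) 0 pts.length
          let seg := PySem.List.slice pts (some (lo : Int)) (some (hi : Int))
          let bs := [r.1] ++ seg
          (acc.1 ++ bs,
           acc.2.1 ++ (seg ++ [r.2.1]),
           acc.2.2.1 ++ List.replicate bs.length r.2.2.1,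
           acc.2.2.2 ++ List.replicate bs.length r.2.2.2)) acc := by
  intro rs
  induction rs with
  | nil => intro acc; rfl
  | cons r rs ih =>
    intro acc
    rw [List.foldl_cons, List.foldl_cons, ih]
    congr 1
    exact step_eq pts hpts acc r

-- ===== VERDICT (by name: the statement is the Claim_ definition above) =====
theorem split_regions_by_points_spec : Claim_equal_split_regions_by_points := by
  intro starts ends values1 values2 split_points _dom
  unfold Spec_split_regions_by_points split_regions_by_points split_regions_by_points_alt
  exact loop_eq (PySem.List.sorted (PySem.Set.ofList split_points) (fun x => x))
    (PySem.List.sorted_ofList_pairwise_lt split_points)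
    (pvZip4 starts ends values1 values2) ([], [], [], [])
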